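-- pv_equiv track=rewrite | github.com/sbremner/jsObfuscate | jsObfuscate.py | obfuscate_boolInt
-- ===== SOURCE A (Python) =====
-- def get_nonalphanumeric(val):
--     zero = '+[]'
--     one = '+!+[]'
--
--     (d,r) = divmod(val, 10)
--
--     if d > 0:
--         return '{0}+[{1}]'.format(get_nonalphanumeric(d), get_nonalphanumeric(r))
--     else:
--         if r == 0:
--             return zero
--         else:
--             return '+[{0}]'.format((one * r))
--
-- def obfuscate_boolInt(s):
--     data = []
--
--     for i in range(0, len(s)):
--         val = ord(s[i])
--
--         data.append(get_nonalphanumeric(val))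
--
--     return "String.fromCharCode({0})".format(
--         ','.join(data)
--     )
-- ===== SOURCE B (Python) =====
-- def obfuscate_boolInt(s):
--     one = '+!+[]'
--
--     def digit_repr(d):
--         return '+[]' if d == 0 else '+[' + one * d + ']'
--
--     def encode(val):
--         digits = []
--         n = val
--         while True:
--             digits.append(n % 10)
--             n //= 10
--             if n == 0:
--                 break
--         digits.reverse()
--         out = digit_repr(digits[0])
--         for d in digits[1:]:
--             out = out + '+[' + digit_repr(d) + ']'
--         return out
--
--     return 'String.fromCharCode(' + ','.join(encode(ord(c)) for c in s) + ')'
-- ===== Notes on version B (the rewrite author's own statement) =====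
-- stated objective: alternative
-- what changed: The recursive digit encoder is replaced by an iterative one: extract the decimal digits of the char code with a loop, then left-fold the wrapped digit representations onto the unwrapped leading digit.
import Mathlib
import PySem

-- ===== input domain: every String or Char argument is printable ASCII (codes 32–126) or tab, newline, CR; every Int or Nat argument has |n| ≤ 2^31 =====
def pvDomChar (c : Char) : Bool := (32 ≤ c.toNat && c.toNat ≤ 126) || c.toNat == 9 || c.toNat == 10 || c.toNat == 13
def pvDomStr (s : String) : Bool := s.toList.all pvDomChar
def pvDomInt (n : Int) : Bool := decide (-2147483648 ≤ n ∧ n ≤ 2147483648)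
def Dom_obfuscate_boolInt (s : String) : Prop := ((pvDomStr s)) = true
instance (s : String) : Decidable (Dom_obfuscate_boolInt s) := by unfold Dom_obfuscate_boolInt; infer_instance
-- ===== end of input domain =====

-- B replaces the recursive digit encoder by an iterative digit-list + fold version (same cost).
-- Ports work on List Char (Python str concatenation/join done on code-point lists; exact for these ASCII constants).

-- ===== PORT A =====
-- get_nonalphanumeric: recursive; divmod(val,10) = (val/10, val%10) exactly, since val = ord(c) ≥ 0.
def getNonalphanumeric (val : Nat) : List Char :=
  let zero := ['+', '[', ']']
  let one := ['+', '!', '+', '[', ']']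
  let d := val / 10
  let r := val % 10
  if 0 < d then
    getNonalphanumeric d ++ ['+', '['] ++ getNonalphanumeric r ++ [']']
  else
    if r = 0 then zero
    else ['+', '['] ++ (List.replicate r one).flatten ++ [']']   -- one * r
decreasing_by
  · exact Nat.div_lt_self (Nat.lt_of_lt_of_le ‹0 < val / 10› (Nat.div_le_self _ _)) (by omega)
  · exact Nat.lt_of_lt_of_le (Nat.mod_lt _ (by omega))
      ((Nat.one_le_div_iff (by omega)).mp ‹0 < val / 10›)

def obfuscate_boolInt (s : String) : String :=
  let data := (List.range s.toList.length).foldl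
    (fun data i => data ++ [getNonalphanumeric ((s.toList.getD i 'a').toNat)]) []
  String.ofList (['S','t','r','i','n','g','.','f','r','o','m','C','h','a','r','C','o','d','e','(']
    ++ PySem.Chars.join [','] data ++ [')'])

-- ===== PORT B =====
-- the digit-extraction while loop: little-endian digit list of n
def pvDigitsLE (n : Nat) : List Nat :=
  n % 10 :: (if h : n / 10 = 0 then [] else pvDigitsLE (n / 10))
decreasing_by
  exact Nat.div_lt_self (Nat.pos_of_ne_zero (fun hz => h (by simp [hz]))) (by omega)

def digitRepr (d : Nat) : List Char :=
  if d = 0 then ['+', '[', ']']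
  else ['+', '['] ++ (List.replicate d ['+', '!', '+', '[', ']']).flatten ++ [']']

def encodeAlt (val : Nat) : List Char :=
  let ds := (pvDigitsLE val).reverse
  (ds.drop 1).foldl (fun out d => out ++ ['+', '['] ++ digitRepr d ++ [']'])
    (digitRepr (ds.headD 0))

def obfuscate_boolInt_alt (s : String) : String :=
  String.ofList (['S','t','r','i','n','g','.','f','r','o','m','C','h','a','r','C','o','d','e','(']
    ++ PySem.Chars.join [','] (s.toList.map (fun c => encodeAlt c.toNat)) ++ [')'])

-- ===== PRECONDITION & SPEC =====
def Spec_obfuscate_boolInt (s : String) (out : String) : Prop := out = obfuscate_boolInt_alt s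
instance (s : String) (out : String) : Decidable (Spec_obfuscate_boolInt s out) := by unfold Spec_obfuscate_boolInt; infer_instance

-- ===== CLAIM (what is proved, stated in full; the proofs are below) =====
def Claim_equal_obfuscate_boolInt : Prop := ∀ (s : String), Dom_obfuscate_boolInt s → Spec_obfuscate_boolInt s (obfuscate_boolInt s)

-- ===== LEMMAS AND PROOFS =====

theorem getNon_small (r : Nat) (h : r < 10) : getNonalphanumeric r = digitRepr r := by
  rw [getNonalphanumeric]
  have hd : r / 10 = 0 := Nat.div_eq_of_lt h
  have hm : r % 10 = r := Nat.mod_eq_of_lt h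
  simp [hd, hm, digitRepr]

theorem digitsLE_ne_nil (n : Nat) : pvDigitsLE n ≠ [] := by
  rw [pvDigitsLE]; simp

theorem encodeAlt_step (val : Nat) (h : 10 ≤ val) :
    encodeAlt val = encodeAlt (val / 10) ++ ['+', '['] ++ digitRepr (val % 10) ++ [']'] := by
  have hds : pvDigitsLE val = val % 10 :: pvDigitsLE (val / 10) := by
    rw [pvDigitsLE]
    have : ¬ val / 10 = 0 := by
      have : 1 ≤ val / 10 := (Nat.le_div_iff_mul_le (by omega)).2 (by omega)
      omega
    simp [this]
  obtain ⟨h0, t, hrev⟩ : ∃ h0 t, (pvDigitsLE (val / 10)).reverse = h0 :: t := by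
    rcases hl : (pvDigitsLE (val / 10)).reverse with _ | ⟨h0, t⟩
    · exact absurd (List.reverse_eq_nil_iff.mp hl) (digitsLE_ne_nil _)
    · exact ⟨h0, t, rfl⟩
  simp only [encodeAlt, hds, List.reverse_cons, hrev]
  simp [List.foldl_append]

theorem enc_eq (val : Nat) : getNonalphanumeric val = encodeAlt val := by
  induction val using Nat.strong_induction_on with
  | _ val ih =>
    by_cases h : val < 10
    · rw [getNon_small val h]
      have hd : val / 10 = 0 := Nat.div_eq_of_lt h
      have hm : val % 10 = val := Nat.mod_eq_of_lt h
      rw [encodeAlt]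
      rw [pvDigitsLE]
      simp [hd, hm]
    · replace h := Nat.le_of_not_lt h
      have hpos : 0 < val / 10 := (Nat.le_div_iff_mul_le (by omega)).2 (by omega)
      rw [getNonalphanumeric]
      simp only [hpos, if_pos]
      rw [encodeAlt_step val h,
        ih (val / 10) (Nat.div_lt_self (by omega) (by omega)),
        getNon_small (val % 10) (Nat.mod_lt _ (by omega))]

theorem foldl_range_getD {α β : Type} (l : List α) (f : α → β) (d : α) :
    (List.range l.length).foldl (fun acc i => acc ++ [f (l.getD i d)]) [] = l.map f := by
  induction l using List.reverseRecOn with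
  | nil => simp
  | append_singleton xs x ih =>
    have hr : (xs ++ [x]).length = xs.length + 1 := by simp
    rw [hr, List.range_succ, List.foldl_append]
    have hcongr : (List.range xs.length).foldl
        (fun acc i => acc ++ [f ((xs ++ [x]).getD i d)]) ([] : List β)
        = (List.range xs.length).foldl (fun acc i => acc ++ [f (xs.getD i d)]) [] := by
      apply List.foldl_ext
      intro acc i hi
      have hi' : i < xs.length := List.mem_range.mp hi
      have : (xs ++ [x]).getD i d = xs.getD i d := by
        simp [List.getD, List.getElem?_append_left hi']
      rw [this]
    rw [hcongr, ih]
    simp [List.getD]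

-- ===== VERDICT (by name: the statement is the Claim_ definition above) =====
theorem obfuscate_boolInt_spec : Claim_equal_obfuscate_boolInt := by
  intro s _
  unfold Spec_obfuscate_boolInt obfuscate_boolInt obfuscate_boolInt_alt
  have := foldl_range_getD s.toList (fun c => getNonalphanumeric c.toNat) 'a'
  simp only [this]
  have : s.toList.map (fun c => getNonalphanumeric c.toNat)
      = s.toList.map (fun c => encodeAlt c.toNat) := by
    apply List.map_congr_left; intro c _; exact enc_eq c.toNat
  rw [this]
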